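-- pv_equiv track=rewrite | github.com/Annafavaro/TAUKADIAL-2024 | classification_experiments/prediction/non_interpretable/MMSE_normal_loss.py | map_values_to_ranges
-- ===== SOURCE A (Python) =====
-- def map_values_to_ranges(value_list):
--     mapped_values = []
--     for value in value_list:
--         if 1 <= value <= 3:
--             mapped_values.append(0)
--         elif 4 <= value <= 6:
--             mapped_values.append(1)
--         elif 7 <= value <= 9:
--             mapped_values.append(2)
--         elif 10 <= value <= 12:
--             mapped_values.append(3)
--         elif 13 <= value <= 15:
--             mapped_values.append(4)
--         elif 16 <= value <= 18:
--             mapped_values.append(5)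
--         elif 19 <= value <= 21:
--             mapped_values.append(6)
--         elif 22 <= value <= 24:
--             mapped_values.append(7)
--         elif 25 <= value <= 27:
--             mapped_values.append(8)
--         elif 28 <= value <= 30:
--             mapped_values.append(9)
--         else:
--             mapped_values.append(None)  # Handle values outside the specified ranges
--     return mapped_values
-- ===== SOURCE B (Python) =====
-- def map_values_to_ranges(value_list):
--     return [(value - 1) // 3 if 1 <= value <= 30 else None for value in value_list]
-- ===== Notes on version B (the rewrite author's own statement) =====
-- stated objective: simpler
-- what changed: Replaced the ten-branch comparison chain appended in a loop by a one-line comprehension computing the bucket with the closed form (value-1)//3 for values in 1..30, None otherwise.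
import Mathlib
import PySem

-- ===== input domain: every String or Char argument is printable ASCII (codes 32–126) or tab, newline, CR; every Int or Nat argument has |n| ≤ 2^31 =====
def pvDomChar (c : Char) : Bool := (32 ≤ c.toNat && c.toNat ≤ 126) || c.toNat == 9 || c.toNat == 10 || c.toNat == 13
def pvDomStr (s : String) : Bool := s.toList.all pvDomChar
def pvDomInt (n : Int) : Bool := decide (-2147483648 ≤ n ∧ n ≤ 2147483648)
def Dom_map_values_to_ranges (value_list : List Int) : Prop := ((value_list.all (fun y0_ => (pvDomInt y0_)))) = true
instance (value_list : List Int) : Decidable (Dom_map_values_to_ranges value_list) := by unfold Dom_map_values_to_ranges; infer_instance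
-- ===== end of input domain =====

-- B replaces A's ten-branch comparison chain by the closed form (value-1)//3 on 1..30 (objective: simpler).

-- ===== PORT A =====
-- literal transliteration: the loop appending through the branch chain becomes a foldl over the accumulator
def map_values_to_ranges (value_list : List Int) : List (Option Int) :=
  value_list.foldl (fun mapped_values value =>
    if 1 ≤ value ∧ value ≤ 3 then mapped_values ++ [some 0]
    else if 4 ≤ value ∧ value ≤ 6 then mapped_values ++ [some 1]
    else if 7 ≤ value ∧ value ≤ 9 then mapped_values ++ [some 2]
    else if 10 ≤ value ∧ value ≤ 12 then mapped_values ++ [some 3]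
    else if 13 ≤ value ∧ value ≤ 15 then mapped_values ++ [some 4]
    else if 16 ≤ value ∧ value ≤ 18 then mapped_values ++ [some 5]
    else if 19 ≤ value ∧ value ≤ 21 then mapped_values ++ [some 6]
    else if 22 ≤ value ∧ value ≤ 24 then mapped_values ++ [some 7]
    else if 25 ≤ value ∧ value ≤ 27 then mapped_values ++ [some 8]
    else if 28 ≤ value ∧ value ≤ 30 then mapped_values ++ [some 9]
    else mapped_values ++ [none]) []

-- ===== PORT B =====
-- literal transliteration of Source B's comprehension; '//' is Python floor division → PySem.Int.floordiv
def map_values_to_ranges_alt (value_list : List Int) : List (Option Int) :=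
  value_list.map (fun value =>
    if 1 ≤ value ∧ value ≤ 30 then some (PySem.Int.floordiv (value - 1) 3) else none)

-- ===== PRECONDITION & SPEC =====
def Spec_map_values_to_ranges (value_list : List Int) (out : List (Option Int)) : Prop := out = map_values_to_ranges_alt value_list
instance (value_list : List Int) (out : List (Option Int)) : Decidable (Spec_map_values_to_ranges value_list out) := by unfold Spec_map_values_to_ranges; infer_instance

-- ===== CLAIM (what is proved, stated in full; the proofs are below) =====
def Claim_equal_map_values_to_ranges : Prop := ∀ (value_list : List Int), Dom_map_values_to_ranges value_list → Spec_map_values_to_ranges value_list (map_values_to_ranges value_list)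

-- ===== LEMMAS AND PROOFS =====

-- A's foldl with snoc equals map of the per-element chain
def pvChainStep (value : Int) : Option Int :=
  if 1 ≤ value ∧ value ≤ 3 then some 0
  else if 4 ≤ value ∧ value ≤ 6 then some 1
  else if 7 ≤ value ∧ value ≤ 9 then some 2
  else if 10 ≤ value ∧ value ≤ 12 then some 3
  else if 13 ≤ value ∧ value ≤ 15 then some 4
  else if 16 ≤ value ∧ value ≤ 18 then some 5
  else if 19 ≤ value ∧ value ≤ 21 then some 6
  else if 22 ≤ value ∧ value ≤ 24 then some 7
  else if 25 ≤ value ∧ value ≤ 27 then some 8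
  else if 28 ≤ value ∧ value ≤ 30 then some 9
  else none

-- pointwise agreement of the two per-element computations
theorem map_values_to_ranges_step (value : Int) :
    pvChainStep value
    = (if 1 ≤ value ∧ value ≤ 30 then some (PySem.Int.floordiv (value - 1) 3) else none) := by
  unfold pvChainStep
  simp only [PySem.Int.floordiv]
  rw [show Int.fdiv (value - 1) 3 = (value - 1) / 3 by rw [Int.fdiv_eq_ediv]; simp]
  split_ifs with h1 h2 h3 h4 h5 h6 h7 h8 h9 h10 h11 <;>
    first
      | (exfalso; omega)
      | rfl
      | (congr 1; omega)

theorem map_values_to_ranges_foldl (l : List Int) (acc : List (Option Int)) :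
    l.foldl (fun mapped_values value =>
      if 1 ≤ value ∧ value ≤ 3 then mapped_values ++ [some 0]
      else if 4 ≤ value ∧ value ≤ 6 then mapped_values ++ [some 1]
      else if 7 ≤ value ∧ value ≤ 9 then mapped_values ++ [some 2]
      else if 10 ≤ value ∧ value ≤ 12 then mapped_values ++ [some 3]
      else if 13 ≤ value ∧ value ≤ 15 then mapped_values ++ [some 4]
      else if 16 ≤ value ∧ value ≤ 18 then mapped_values ++ [some 5]
      else if 19 ≤ value ∧ value ≤ 21 then mapped_values ++ [some 6]
      else if 22 ≤ value ∧ value ≤ 24 then mapped_values ++ [some 7]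
      else if 25 ≤ value ∧ value ≤ 27 then mapped_values ++ [some 8]
      else if 28 ≤ value ∧ value ≤ 30 then mapped_values ++ [some 9]
      else mapped_values ++ [none]) acc
    = acc ++ l.map pvChainStep := by
  induction l generalizing acc with
  | nil => simp
  | cons v t ih =>
    simp only [List.foldl_cons, List.map_cons]
    have h : (if 1 ≤ v ∧ v ≤ 3 then acc ++ [some (0:Int)]
      else if 4 ≤ v ∧ v ≤ 6 then acc ++ [some 1]
      else if 7 ≤ v ∧ v ≤ 9 then acc ++ [some 2]
      else if 10 ≤ v ∧ v ≤ 12 then acc ++ [some 3]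
      else if 13 ≤ v ∧ v ≤ 15 then acc ++ [some 4]
      else if 16 ≤ v ∧ v ≤ 18 then acc ++ [some 5]
      else if 19 ≤ v ∧ v ≤ 21 then acc ++ [some 6]
      else if 22 ≤ v ∧ v ≤ 24 then acc ++ [some 7]
      else if 25 ≤ v ∧ v ≤ 27 then acc ++ [some 8]
      else if 28 ≤ v ∧ v ≤ 30 then acc ++ [some 9]
      else acc ++ [none]) = acc ++ [pvChainStep v] := by
      simp only [pvChainStep, apply_ite (fun o : Option Int => acc ++ [o])]
    rw [h, ih, List.append_assoc]
    rfl

-- ===== VERDICT (by name: the statement is the Claim_ definition above) =====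
theorem map_values_to_ranges_spec : Claim_equal_map_values_to_ranges := by
  intro value_list _
  unfold Spec_map_values_to_ranges map_values_to_ranges map_values_to_ranges_alt
  rw [map_values_to_ranges_foldl value_list [], List.nil_append]
  exact List.map_congr_left (fun v _ => by
    rw [map_values_to_ranges_step v])
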